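-- pv_equiv track=rewrite | github.com/pwindx20/2023_Algorithm_Study | wiese0630/PGR/231025/과일 장수.py | solution
-- ===== SOURCE A (Python) =====
-- def solution(k, m, score):
--
--     score.sort(reverse=True)
--     # 사과 가격 내림차순으로 정렬
--
--     divided_score = [score[i:i+m] for i in range(0, len(score), m)]
--     # m개의 원소를 갖도록 리스트 분할
--
--     sum = 0
--     for group in divided_score: # 분할한 리스트 중
--         if len(group) == m: # 원소 개수가 m개면
--             sum += min(group) * m
--
--
--
--     answer =  sum
--     return answer
-- ===== SOURCE B (Python) =====
-- def solution(k, m, score):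
--     # After a descending in-place sort, the minimum of each complete m-sized
--     # group is its last element, at indices m-1, 2m-1, ...; sum those times m.
--     score.sort(reverse=True)
--     total = 0
--     for i in range(m - 1, len(score), m):
--         total += score[i] * m
--     return total
-- ===== Notes on version B (the rewrite author's own statement) =====
-- stated objective: simpler
-- what changed: Instead of building m-sized sublists and taking min of each full group, B sums the stride elements score[m-1::m] of the descending-sorted list (each full group's minimum is its last element) times m, dropping the grouping and the min calls.
import Mathlib
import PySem

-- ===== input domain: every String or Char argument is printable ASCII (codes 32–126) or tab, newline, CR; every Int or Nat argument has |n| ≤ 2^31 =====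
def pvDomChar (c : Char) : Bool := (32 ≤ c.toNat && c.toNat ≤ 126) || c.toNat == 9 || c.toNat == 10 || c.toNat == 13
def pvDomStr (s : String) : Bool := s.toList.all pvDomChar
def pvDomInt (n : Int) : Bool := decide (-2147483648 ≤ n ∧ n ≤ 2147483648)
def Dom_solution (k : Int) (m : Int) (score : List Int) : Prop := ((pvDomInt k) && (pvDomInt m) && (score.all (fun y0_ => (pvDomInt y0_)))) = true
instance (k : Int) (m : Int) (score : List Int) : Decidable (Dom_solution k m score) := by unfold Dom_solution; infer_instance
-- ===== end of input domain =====

-- B sums the last element of each complete descending-sorted m-group (the group's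
-- minimum) times m, instead of materialising the groups and calling min; objective:
-- simpler. Both Pythons sort `score` in place (same side effect); equivalence is
-- about the return value.

-- ===== PORT A =====
def solution (k : Int) (m : Int) (score : List Int) : Int :=
  let s := PySem.List.sorted score (fun x => x) true
  let divided_score := (PySem.List.pyRange 0 (s.length : Int) m).map
    (fun i => PySem.List.slice s (some i) (some (i + m)))
  -- min(group): group is nonempty whenever the guard fires under Pre_ (m ≠ 0),
  -- so the .getD 0 default is never used
  divided_score.foldl
    (fun sum group =>
      if ((group.length : Int) = m) then
        sum + ((PySem.List.min? group (fun y => y)).getD 0) * m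
      else sum) 0

-- ===== PORT B =====
def solution_alt (k : Int) (m : Int) (score : List Int) : Int :=
  let s := PySem.List.sorted score (fun x => x) true
  -- score[i]: every i produced by the range is a valid index, so the default 0 is never used
  (PySem.List.pyRange (m - 1) (s.length : Int) m).foldl
    (fun total i => total + (PySem.List.pyGetD s i 0) * m) 0

-- ===== PRECONDITION & SPEC =====
-- Pre_ excludes exactly m = 0, on which both Pythons raise ValueError (range step 0).
def Pre_solution (k : Int) (m : Int) (score : List Int) : Prop := m ≠ 0
instance (k : Int) (m : Int) (score : List Int) : Decidable (Pre_solution k m score) := by unfold Pre_solution; infer_instance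
def pvWitness_solution : Int × Int × List Int := (4, 3, [1, 2, 3, 1, 2])
def Spec_solution (k : Int) (m : Int) (score : List Int) (out : Int) : Prop := out = solution_alt k m score
instance (k : Int) (m : Int) (score : List Int) (out : Int) : Decidable (Spec_solution k m score out) := by unfold Spec_solution; infer_instance

-- ===== CLAIM (what is proved, stated in full; the proofs are below) =====
def Claim_equal_solution : Prop := ∀ (k : Int) (m : Int) (score : List Int), Dom_solution k m score → Pre_solution k m score → Spec_solution k m score (solution k m score)

-- ===== LEMMAS AND PROOFS =====

theorem pyRange_neg_nil (a b s : Int) (hs : s < 0) (hab : a ≤ b) :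
    PySem.List.pyRange a b s = [] := by
  unfold PySem.List.pyRange
  rw [if_neg (by omega), if_neg (by omega), if_neg (by omega)]
  simp

theorem pyRange_pos_cons (a b s : Int) (hs : 0 < s) (hab : a < b) :
    PySem.List.pyRange a b s = a :: PySem.List.pyRange (a + s) b s := by
  rw [PySem.List.pyRange_of_pos _ _ hs, PySem.List.pyRange_of_pos _ _ hs]
  rw [if_pos hab]
  have hcnt : ((b - a + s - 1) / s).toNat =
      (if a + s < b then ((b - (a + s) + s - 1) / s).toNat else 0) + 1 := by
    split_ifs with h
    · have h1 : b - (a + s) + s - 1 = (b - a + s - 1) + (-1) * s := by ring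
      rw [h1, Int.add_mul_ediv_right _ _ (by omega)]
      have hpos : 1 ≤ (b - a + s - 1) / s := by
        rw [Int.le_ediv_iff_mul_le hs]; omega
      omega
    · have h2 : (b - a + s - 1) / s = 1 := by
        have hl : 1 ≤ (b - a + s - 1) / s := by
          rw [Int.le_ediv_iff_mul_le hs]; omega
        have hu : (b - a + s - 1) / s < 2 := by
          rw [Int.ediv_lt_iff_lt_mul hs]; omega
        omega
      simp [h2]
  rw [hcnt, List.range_succ_eq_map]
  simp only [List.map_cons, List.map_map]
  congr 1
  · push_cast; ring
  · apply List.map_congr_left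
    intro k _
    simp only [Function.comp_apply]
    push_cast
    ring

theorem pyRange_pos_nil (a b s : Int) (hs : 0 < s) (hab : b ≤ a) :
    PySem.List.pyRange a b s = [] := by
  rw [PySem.List.pyRange_of_pos _ _ hs, if_neg (by omega)]
  simp

theorem pyRange_shift (a b s c : Int) :
    PySem.List.pyRange (a + c) (b + c) s = (PySem.List.pyRange a b s).map (· + c) := by
  unfold PySem.List.pyRange
  have hd : b + c - (a + c) = b - a := by ring
  have hd2 : a + c - (b + c) = a - b := by ring
  split_ifs with h1 h2 h3 h2 h3 <;> simp_all <;> (intros; ring)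

-- min of a nonempty weakly-descending list is its last element (as a value)
theorem min?_desc_getLast (g : List Int) (hne : g ≠ [])
    (hd : g.Pairwise (fun a b => b ≤ a)) :
    (PySem.List.min? g (fun y => y)).getD 0 = g.getLast hne := by
  obtain ⟨v, hv⟩ : ∃ v, PySem.List.min? g (fun y => y) = some v := by
    cases hmin : PySem.List.min? g (fun y => y) with
    | none => exact absurd ((PySem.List.min?_eq_none_iff g (fun y => y)).mp hmin) hne
    | some v => exact ⟨v, rfl⟩
  rw [hv]; simp only [Option.getD_some]
  have hvmem : v ∈ g := PySem.List.min?_mem hv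
  have hvmin : ∀ y ∈ g, v ≤ y := by
    intro y hy; exact PySem.List.min?_isMin hv y hy
  have hlastmem : g.getLast hne ∈ g := List.getLast_mem hne
  have hge : ∀ y ∈ g, g.getLast hne ≤ y := by
    intro y hy
    rcases List.mem_iff_getElem.mp hy with ⟨i, hi, rfl⟩
    rcases Nat.lt_or_ge i (g.length - 1) with hlt | hge
    · have := List.pairwise_iff_getElem.mp hd i (g.length - 1) hi
        (by omega) (by omega)
      rw [List.getLast_eq_getElem]
      exact this
    · have : i = g.length - 1 := by
        have := List.length_pos_of_ne_nil hne; omega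
      subst this
      rw [List.getLast_eq_getElem]
  exact le_antisymm (hvmin _ hlastmem) (hge _ hvmem)

-- the common core: for a weakly-descending list s and m ≥ 1, A's grouped sum equals B's stride sum
theorem core_eq (m : Int) (hm : 0 < m) (s : List Int)
    (hd : s.Pairwise (fun a b => b ≤ a)) :
    (((PySem.List.pyRange 0 (s.length : Int) m).map
        (fun i => PySem.List.slice s (some i) (some (i + m)))).map
      (fun group => if ((group.length : Int) = m) then
          ((PySem.List.min? group (fun y => y)).getD 0) * m else 0)).sum =
    ((PySem.List.pyRange (m - 1) (s.length : Int) m).map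
      (fun i => (PySem.List.pyGetD s i 0) * m)).sum := by
  induction hn : s.length using Nat.strong_induction_on generalizing s with
  | _ n ih =>
  subst hn
  by_cases hlt : (s.length : Int) < m
  · -- no complete group; B's range is empty
    rw [pyRange_pos_nil (m - 1) (s.length : Int) m hm (by omega)]
    by_cases hnil : (s.length : Int) ≤ 0
    · rw [pyRange_pos_nil 0 (s.length : Int) m hm hnil]; simp
    · rw [pyRange_pos_cons 0 (s.length : Int) m hm (by omega),
        pyRange_pos_nil (0 + m) (s.length : Int) m hm (by omega)]
      simp only [List.map_cons, List.map_nil, List.sum_cons, List.sum_nil]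
      rw [if_neg]
      · simp
      · rw [PySem.List.length_slice]
        simp only [PySem.List.clampIdx]
        split_ifs <;> omega
  · -- at least one complete group: peel it off and use the IH on s.drop m.toNat
    rw [not_lt] at hlt
    have hmnat : 0 < m.toNat := by omega
    have hlen : m.toNat ≤ s.length := by omega
    have hlenpos : 0 < s.length := by omega
    rw [pyRange_pos_cons 0 (s.length : Int) m hm (by omega),
        pyRange_pos_cons (m - 1) (s.length : Int) m hm (by omega)]
    simp only [List.map_cons, List.sum_cons, zero_add]
    have hslice0 : PySem.List.slice s (some (0 : Int)) (some m) = s.take m.toNat := by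
      rw [PySem.List.slice_zero_start, PySem.List.slice_to s hm.le]
    have hlen0 : ((PySem.List.slice s (some (0 : Int)) (some m)).length : Int) = m := by
      rw [PySem.List.slice_zero_start, PySem.List.slice_to s hm.le, List.length_take]
      push_cast
      omega
    rw [if_pos hlen0, hslice0]
    -- first group's min is s[m.toNat - 1]
    have htne : s.take m.toNat ≠ [] := by
      apply List.ne_nil_of_length_pos
      rw [List.length_take]
      omega
    have htd : (s.take m.toNat).Pairwise (fun a b => b ≤ a) :=
      hd.sublist (List.take_sublist _ _)
    rw [min?_desc_getLast _ htne htd]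
    have hidx : m.toNat - 1 < s.length := by omega
    have hlast : (s.take m.toNat).getLast htne = s[m.toNat - 1] := by
      rw [List.getLast_eq_getElem, List.getElem_take]
      congr 1
      simp
      omega
    -- B's first term
    have hB1 : PySem.List.pyGetD s (m - 1) 0 = s[m.toNat - 1] := by
      rw [PySem.List.pyGetD_eq_getElem s 0 (by omega) (by omega)]
      congr 1
      omega
    rw [hlast, hB1]
    -- the tails: shift both ranges by m and reindex into s.drop m.toNat
    congr 1
    have hdrop_len : ((s.drop m.toNat).length : Int) = (s.length : Int) - m := by
      simp
      omega
    have hshiftA : PySem.List.pyRange m (s.length : Int) m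
        = (PySem.List.pyRange 0 ((s.drop m.toNat).length : Int) m).map (· + m) := by
      rw [← pyRange_shift, hdrop_len]
      congr 1 <;> ring
    have hshiftB : PySem.List.pyRange (m - 1 + m) (s.length : Int) m
        = (PySem.List.pyRange (m - 1) ((s.drop m.toNat).length : Int) m).map (· + m) := by
      rw [← pyRange_shift, hdrop_len]
      congr 1
      ring
    rw [hshiftA, hshiftB]
    simp only [List.map_map, Function.comp_def]
    have hA := ih (s.drop m.toNat).length (by omega) (s.drop m.toNat)
      (hd.sublist (List.drop_sublist _ _)) rfl
    simp only [List.map_map, Function.comp_def] at hA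
    have hAe : List.map
        (fun i => if (((PySem.List.slice s (some (i + m)) (some (i + m + m))).length : Int) = m)
            then ((PySem.List.min? (PySem.List.slice s (some (i + m)) (some (i + m + m)))
              (fun y => y)).getD 0) * m else 0)
        (PySem.List.pyRange 0 ((s.drop m.toNat).length : Int) m)
        = List.map
        (fun i => if (((PySem.List.slice (s.drop m.toNat) (some i) (some (i + m))).length : Int) = m)
            then ((PySem.List.min? (PySem.List.slice (s.drop m.toNat) (some i) (some (i + m)))
              (fun y => y)).getD 0) * m else 0)
        (PySem.List.pyRange 0 ((s.drop m.toNat).length : Int) m) := by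
      apply List.map_congr_left
      intro i hi
      have hi0 : 0 ≤ i := ((PySem.List.mem_pyRange_iff_of_pos hm i).mp hi).1
      have hsl : PySem.List.slice s (some (i + m)) (some (i + m + m))
          = PySem.List.slice (s.drop m.toNat) (some i) (some (i + m)) := by
        rw [PySem.List.slice_toNat s (by omega) (by omega),
            PySem.List.slice_toNat (s.drop m.toNat) hi0 (by omega),
            List.drop_drop]
        congr 1
        · omega
        · congr 1
          omega
      rw [hsl]
    have hBe : List.map (fun i => PySem.List.pyGetD s (i + m) 0 * m)
        (PySem.List.pyRange (m - 1) ((s.drop m.toNat).length : Int) m)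
        = List.map (fun i => PySem.List.pyGetD (s.drop m.toNat) i 0 * m)
        (PySem.List.pyRange (m - 1) ((s.drop m.toNat).length : Int) m) := by
      apply List.map_congr_left
      intro i hi
      rcases (PySem.List.mem_pyRange_iff_of_pos hm i).mp hi with ⟨h1, h2, _⟩
      congr 1
      rw [PySem.List.pyGetD_eq_getElem s 0 (by omega) (by omega),
          PySem.List.pyGetD_eq_getElem (s.drop m.toNat) 0 (by omega) (by omega),
          List.getElem_drop]
      congr 1
      omega
    rw [hAe, hBe]
    exact hA

-- ===== VERDICT (by name: the statement is the Claim_ definition above) =====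
theorem solution_spec : Claim_equal_solution := by
  intro k m score _ hpre
  unfold Spec_solution solution solution_alt
  simp only []
  set s := PySem.List.sorted score (fun x => x) true with hs
  have hd : s.Pairwise (fun a b => b ≤ a) := PySem.List.sorted_pairwise_rev score _
  rcases lt_or_gt_of_ne hpre with hneg | hpos
  · -- m < 0: both ranges are empty
    rw [pyRange_neg_nil 0 (s.length : Int) m hneg (by positivity),
        pyRange_neg_nil (m - 1) (s.length : Int) m hneg (by omega)]
    simp
  · -- m > 0: reduce both folds to sums and use the core lemma
    have hfA : ∀ (init : Int) (l : List (List Int)),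
        l.foldl (fun sum group => if ((group.length : Int) = m) then
            sum + ((PySem.List.min? group (fun y => y)).getD 0) * m else sum) init
        = init + (l.map (fun group => if ((group.length : Int) = m) then
            ((PySem.List.min? group (fun y => y)).getD 0) * m else 0)).sum := by
      intro init l
      induction l generalizing init with
      | nil => simp
      | cons h t iht =>
        simp only [List.foldl_cons, List.map_cons, List.sum_cons]
        rw [iht]
        split_ifs <;> ring
    rw [hfA, PySem.List.foldl_add]
    rw [zero_add, zero_add]
    exact core_eq m hpos s hd
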